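-- pv_equiv track=rewrite | github.com/dsi-icl/do-voice-interaction | gdo_voicebot/speech_filler_service/speech_filler_utils.py | generate_nsf_sentence
-- ===== SOURCE A (Python) =====
-- def is_nsf(word):
--     return word == "(um)" or \
--            word == "(uh)" or \
--            word == "(pause)"
--
-- def generate_nsf_sentence(sentence, draw_set):
--     new_sent = sentence.split()
--     for (bigram, pos) in draw_set:
--         if is_nsf(bigram[0][0]):
--             new_sent = new_sent[:(pos - 1)] + [bigram[0][0]] + new_sent[(pos - 1):]
--         else:
--             new_sent = new_sent[:pos] + [bigram[0][1]] + new_sent[pos:]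
--
--     return ' '.join(word for word in new_sent)
-- ===== SOURCE B (Python) =====
-- def is_nsf(word):
--     return word == "(um)" or \
--            word == "(uh)" or \
--            word == "(pause)"
--
-- def generate_nsf_sentence(sentence, draw_set):
--     # Gap buffer: `front` holds the words before the cursor (top of stack nearest
--     # the cursor), `back` holds the words after it, reversed.  Each insertion only
--     # moves the cursor by the distance to the requested position instead of
--     # copying the whole word list.
--     front = []
--     back = sentence.split()[::-1]
--     for bigram, pos in draw_set:
--         if is_nsf(bigram[0][0]):
--             word, p = bigram[0][0], pos - 1
--         else:
--             word, p = bigram[0][1], pos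
--         while len(front) < p and back:
--             front.append(back.pop())
--         while front and p < len(front):
--             back.append(front.pop())
--         front.append(word)
--     return ' '.join(front + back[::-1])
-- ===== Notes on version B (the rewrite author's own statement) =====
-- stated objective: alternative
-- what changed: Replaces A's per-insertion whole-list slicing and concatenation with a gap buffer (two stacks) whose cursor moves only by the distance between consecutive insertion positions.
-- intended difference: On draws whose effective insertion position is negative but greater than minus the current word count (e.g. a filler drawn at position 0), A's Python slices wrap around and insert the word that far from the END of the sentence, while B inserts it at the front; position 0 means the sentence start, so B's value is the intended one. — e.g. on generate_nsf_sentence("a b", [([["(um)", "x"]], 0)]): A returns "a (um) b", B returns "(um) a b"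
import Mathlib
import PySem

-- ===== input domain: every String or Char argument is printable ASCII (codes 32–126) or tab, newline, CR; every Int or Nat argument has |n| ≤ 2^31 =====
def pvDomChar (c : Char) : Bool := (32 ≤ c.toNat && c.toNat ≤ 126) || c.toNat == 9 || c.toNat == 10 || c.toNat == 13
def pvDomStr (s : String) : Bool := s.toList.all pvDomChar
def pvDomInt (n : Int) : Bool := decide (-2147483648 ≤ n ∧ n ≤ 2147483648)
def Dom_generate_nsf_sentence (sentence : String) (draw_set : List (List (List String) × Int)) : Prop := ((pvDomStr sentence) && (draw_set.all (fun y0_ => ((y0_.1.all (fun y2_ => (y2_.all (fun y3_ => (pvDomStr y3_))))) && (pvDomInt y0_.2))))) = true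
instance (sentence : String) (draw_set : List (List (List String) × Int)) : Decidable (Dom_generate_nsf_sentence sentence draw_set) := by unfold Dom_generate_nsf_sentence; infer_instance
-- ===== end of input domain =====

-- B replaces A's per-insertion list slicing with a gap buffer (two stacks); alternative
-- structure, same cost class; on negative effective positions B inserts at the front
-- (see D_ below) instead of wrapping around from the end as A does.

-- ===== PORT A =====
def is_nsf (word : String) : Bool :=
  word == "(um)" || word == "(uh)" || word == "(pause)"

-- one iteration of A's for-loop (bigram[0][0]/bigram[0][1] read with defaults;
-- Pre_ guarantees the indices exist, as in the Python)
def aStep (new_sent : List String) (d : List (List String) × Int) : List String :=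
  if is_nsf ((d.1.headD []).headD "") then
    PySem.List.slice new_sent none (some (d.2 - 1)) ++ [(d.1.headD []).headD ""] ++
      PySem.List.slice new_sent (some (d.2 - 1)) none
  else
    PySem.List.slice new_sent none (some d.2) ++ [(d.1.headD []).getD 1 ""] ++
      PySem.List.slice new_sent (some d.2) none

def generate_nsf_sentence (sentence : String) (draw_set : List (List (List String) × Int)) : String :=
  PySem.Str.join " " (draw_set.foldl aStep (PySem.Str.split₀ sentence))

-- ===== PORT B =====
-- gap buffer: `f` = words before the cursor, head nearest the cursor (Python's `front`,
-- top of stack = head); `b` = words after the cursor, head nearest the cursor (Python's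
-- `back`, top of stack = head).

-- the word to insert: bigram[0][0] for a filler, else bigram[0][1] (defaults as in port A)
def bWord (d : List (List String) × Int) : String :=
  if is_nsf ((d.1.headD []).headD "") then (d.1.headD []).headD "" else (d.1.headD []).getD 1 ""

-- the requested insertion position p: pos - 1 for a filler, else pos
def bPos (d : List (List String) × Int) : Int :=
  if is_nsf ((d.1.headD []).headD "") then d.2 - 1 else d.2

-- `while len(front) < p and back: front.append(back.pop())`
def bMoveR (p : Int) : List String → List String → List String × List String
  | f, [] => (f, [])
  | f, x :: b => if (f.length : Int) < p then bMoveR p (x :: f) b else (f, x :: b)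

-- `while front and p < len(front): back.append(front.pop())`
def bMoveL (p : Int) : List String → List String → List String × List String
  | [], b => ([], b)
  | x :: f, b => if p < ((x :: f).length : Int) then bMoveL p f (x :: b) else (x :: f, b)

-- one iteration of B's for-loop: the two while loops, then `front.append(word)`
def bStep (st : List String × List String) (d : List (List String) × Int) : List String × List String :=
  let p := bPos d
  let s1 := bMoveR p st.1 st.2
  let s2 := bMoveL p s1.1 s1.2
  (bWord d :: s2.1, s2.2)

def generate_nsf_sentence_alt (sentence : String) (draw_set : List (List (List String) × Int)) : String :=
  PySem.Str.join " "
    ((draw_set.foldl bStep ([], PySem.Str.split₀ sentence)).1.reverse ++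
      (draw_set.foldl bStep ([], PySem.Str.split₀ sentence)).2)

-- ===== PRECONDITION & SPEC =====
-- Pre_ excludes exactly the inputs on which the Python A raises IndexError
-- (bigram or bigram[0] empty, or a non-filler bigram[0] with fewer than 2 words);
-- B raises there too.
def Pre_generate_nsf_sentence (sentence : String) (draw_set : List (List (List String) × Int)) : Prop :=
  ∀ d ∈ draw_set, d.1 ≠ [] ∧ d.1.headD [] ≠ [] ∧
    (is_nsf ((d.1.headD []).headD "") = true ∨ 2 ≤ (d.1.headD []).length)
instance (sentence : String) (draw_set : List (List (List String) × Int)) : Decidable (Pre_generate_nsf_sentence sentence draw_set) := by unfold Pre_generate_nsf_sentence; infer_instance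

def pvWitness_generate_nsf_sentence : String × (List (List (List String) × Int)) :=
  ("hello there world", [([["(um)", "x"]], 1), ([["so", "like"]], 2)])

-- On draws whose effective insertion position (pos - 1 for a filler word, else pos) is
-- negative but greater than minus the current word count (e.g. a filler drawn at
-- position 0), A wraps around and inserts that far from the END of the sentence, while
-- B inserts at the front; position 0 means the sentence start, so B's value is the
-- intended one.
def D_generate_nsf_sentence (sentence : String) (draw_set : List (List (List String) × Int)) : Prop :=
  ∃ p ∈ draw_set.zipIdx,
    let e := if (p.1.1.headD []).headD "" ∈ (["(um)", "(uh)", "(pause)"] : List String) then p.1.2 - 1 else p.1.2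
    e < 0 ∧ 0 < e + ((PySem.Str.split₀ sentence).length : Int) + p.2
instance (sentence : String) (draw_set : List (List (List String) × Int)) : Decidable (D_generate_nsf_sentence sentence draw_set) := by unfold D_generate_nsf_sentence; infer_instance

def Spec_generate_nsf_sentence (sentence : String) (draw_set : List (List (List String) × Int)) (out : String) : Prop := ¬ D_generate_nsf_sentence sentence draw_set → out = generate_nsf_sentence_alt sentence draw_set
instance (sentence : String) (draw_set : List (List (List String) × Int)) (out : String) : Decidable (Spec_generate_nsf_sentence sentence draw_set out) := by unfold Spec_generate_nsf_sentence; infer_instance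

def pvDiffWitness_generate_nsf_sentence : String × (List (List (List String) × Int)) :=
  ("a b", [([["(um)", "x"]], 0)])
def pvDiffWitnessOut_generate_nsf_sentence : String × String := ("a (um) b", "(um) a b")

-- ===== CLAIM (what is proved, stated in full; the proofs are below) =====
def Claim_unchanged_generate_nsf_sentence : Prop := ∀ (sentence : String) (draw_set : List (List (List String) × Int)), Dom_generate_nsf_sentence sentence draw_set → Pre_generate_nsf_sentence sentence draw_set → Spec_generate_nsf_sentence sentence draw_set (generate_nsf_sentence sentence draw_set)
def Claim_changed_generate_nsf_sentence : Prop := Dom_generate_nsf_sentence (pvDiffWitness_generate_nsf_sentence.1) (pvDiffWitness_generate_nsf_sentence.2) ∧ Pre_generate_nsf_sentence (pvDiffWitness_generate_nsf_sentence.1) (pvDiffWitness_generate_nsf_sentence.2) ∧ D_generate_nsf_sentence (pvDiffWitness_generate_nsf_sentence.1) (pvDiffWitness_generate_nsf_sentence.2) ∧ generate_nsf_sentence (pvDiffWitness_generate_nsf_sentence.1) (pvDiffWitness_generate_nsf_sentence.2) = pvDiffWitnessOut_generate_nsf_sentence.1 ∧ generate_nsf_sentence_alt (pvDiffWitness_generate_nsf_sentence.1)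 (pvDiffWitness_generate_nsf_sentence.2) = pvDiffWitnessOut_generate_nsf_sentence.2 ∧ pvDiffWitnessOut_generate_nsf_sentence.1 ≠ pvDiffWitnessOut_generate_nsf_sentence.2

-- ===== LEMMAS AND PROOFS =====

lemma mem_fillers_iff (w : String) :
    w ∈ (["(um)", "(uh)", "(pause)"] : List String) ↔ is_nsf w = true := by
  simp [is_nsf]
  tauto

lemma bPos_eq (d : List (List String) × Int) :
    bPos d = if (d.1.headD []).headD "" ∈ (["(um)", "(uh)", "(pause)"] : List String) then d.2 - 1 else d.2 := by
  unfold bPos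
  by_cases h : ((d.1.headD []).headD "") ∈ (["(um)", "(uh)", "(pause)"] : List String)
  · rw [if_pos h, if_pos ((mem_fillers_iff _).mp h)]
  · rw [if_neg h, if_neg (fun hb => h ((mem_fillers_iff _).mpr hb))]

lemma slice_none_some_eq_take (xs : List String) (p : Int) :
    PySem.List.slice xs none (some p) = xs.take (PySem.List.clampIdx xs.length p) := rfl

-- A's step, rewritten as take/drop at the clamped position, with B's word/position
lemma aStep_eq (xs : List String) (d : List (List String) × Int) :
    aStep xs d = xs.take (PySem.List.clampIdx xs.length (bPos d)) ++ [bWord d] ++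
      xs.drop (PySem.List.clampIdx xs.length (bPos d)) := by
  unfold aStep bWord bPos
  split_ifs with h <;> simp [slice_none_some_eq_take, PySem.List.slice_some_none]

lemma aStep_length (xs : List String) (d : List (List String) × Int) :
    (aStep xs d).length = xs.length + 1 := by
  rw [aStep_eq]
  simp


lemma bMoveR_spec (p : Int) (f b : List String) :
    (bMoveR p f b).1.reverse ++ (bMoveR p f b).2 = f.reverse ++ b ∧
      ((bMoveR p f b).1.length : Int) = min (max p f.length) (f.length + b.length) := by
  induction b generalizing f with
  | nil =>
    refine ⟨by simp [bMoveR], ?_⟩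
    show ((f.length : Nat) : Int) = _
    simp only [List.length_nil]
    omega
  | cons x b ih =>
    by_cases h : (f.length : Int) < p
    · have h1 := (ih (x :: f)).1
      have h2 := (ih (x :: f)).2
      simp only [bMoveR, if_pos h]
      refine ⟨by rw [h1]; simp, ?_⟩
      rw [h2]; simp only [List.length_cons]; push_cast; omega
    · simp only [bMoveR, if_neg h]
      refine ⟨by simp, ?_⟩
      simp only [List.length_cons]; push_cast; omega

lemma bMoveL_spec (p : Int) (f b : List String) :
    (bMoveL p f b).1.reverse ++ (bMoveL p f b).2 = f.reverse ++ b ∧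
      ((bMoveL p f b).1.length : Int) = max (min p f.length) 0 := by
  induction f generalizing b with
  | nil =>
    refine ⟨by simp [bMoveL], ?_⟩
    show ((List.length ([] : List String) : Nat) : Int) = _
    simp only [List.length_nil]
    omega
  | cons x f ih =>
    by_cases h : p < ((x :: f).length : Int)
    · have h1 := (ih (x :: b)).1
      have h2 := (ih (x :: b)).2
      simp only [bMoveL, if_pos h]
      refine ⟨by rw [h1]; simp, ?_⟩
      rw [h2]; simp only [List.length_cons] at h ⊢; push_cast at h ⊢; omega
    · simp only [bMoveL, if_neg h]
      refine ⟨by simp, ?_⟩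
      simp only [List.length_cons] at h ⊢; push_cast at h ⊢; omega

-- one B step realises one A step, provided the position is not in the wrap-around band
lemma step_eq (f b : List String) (d : List (List String) × Int)
    (hgood : ¬(bPos d < 0 ∧ 0 < bPos d + ((f.length + b.length : Nat) : Int))) :
    (bStep (f, b) d).1.reverse ++ (bStep (f, b) d).2 = aStep (f.reverse ++ b) d := by
  rw [aStep_eq]
  unfold bStep
  simp only
  set p := bPos d with hp
  obtain ⟨hr1, hr2⟩ := bMoveR_spec p f b
  obtain ⟨hl1, hl2⟩ := bMoveL_spec p (bMoveR p f b).1 (bMoveR p f b).2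
  set s2 := bMoveL p (bMoveR p f b).1 (bMoveR p f b).2 with hs2
  have hrep : s2.1.reverse ++ s2.2 = f.reverse ++ b := by rw [hl1, hr1]
  have hn : (f.reverse ++ b).length = f.length + b.length := by simp
  -- the final cursor index equals Python's clamped slice index
  have hclamp : (s2.1.length : Int) = (PySem.List.clampIdx (f.reverse ++ b).length p : Int) := by
    rw [hl2, hr2, hn]
    unfold PySem.List.clampIdx
    split_ifs with h1 <;> push_cast <;> omega
  have hlen : s2.1.reverse.length = PySem.List.clampIdx (f.reverse ++ b).length p := by
    simp only [List.length_reverse]; omega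
  have hlen2 : s2.1.reverse.length = PySem.List.clampIdx (s2.1.reverse ++ s2.2).length p := by
    rw [hrep]; exact hlen
  have htake : (f.reverse ++ b).take (PySem.List.clampIdx (f.reverse ++ b).length p) =
      s2.1.reverse := by rw [← hrep]; exact List.take_left' hlen2
  have hdrop : (f.reverse ++ b).drop (PySem.List.clampIdx (f.reverse ++ b).length p) =
      s2.2 := by rw [← hrep]; exact List.drop_left' hlen2
  rw [htake, hdrop]
  simp

lemma fold_eq (ds : List (List (List String) × Int)) (f b : List String)
    (hgood : ∀ i < ds.length, ¬(bPos (ds.getD i ([], 0)) < 0 ∧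
      0 < bPos (ds.getD i ([], 0)) + ((f.length + b.length : Nat) : Int) + i)) :
    (ds.foldl bStep (f, b)).1.reverse ++ (ds.foldl bStep (f, b)).2 =
      ds.foldl aStep (f.reverse ++ b) := by
  induction ds generalizing f b with
  | nil => simp
  | cons d ds ih =>
    simp only [List.foldl_cons]
    have h0 := hgood 0 (by simp)
    simp only [List.getD_cons_zero] at h0
    have hstep := step_eq f b d (by intro ⟨a1, a2⟩; exact h0 ⟨a1, by push_cast at a2 ⊢; omega⟩)
    have hnext : ∀ i < ds.length, ¬(bPos (ds.getD i ([], 0)) < 0 ∧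
        0 < bPos (ds.getD i ([], 0)) +
          (((bStep (f, b) d).1.length + (bStep (f, b) d).2.length : Nat) : Int) + i) := by
      intro i hi hcontra
      have hlen : (bStep (f, b) d).1.length + (bStep (f, b) d).2.length = f.length + b.length + 1 := by
        have h1 : ((bStep (f, b) d).1.reverse ++ (bStep (f, b) d).2).length =
            (aStep (f.reverse ++ b) d).length := by rw [hstep]
        rw [aStep_length] at h1
        simp at h1
        omega
      have := hgood (i + 1) (by simp; omega)
      simp only [List.getD_cons_succ] at this
      rw [hlen] at hcontra
      exact this ⟨hcontra.1, by push_cast at hcontra ⊢; omega⟩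
    have hmain := ih (bStep (f, b) d).1 (bStep (f, b) d).2 hnext
    rw [hstep] at hmain
    exact hmain

-- ===== VERDICT (by name: the statement is the Claim_ definition above) =====
theorem generate_nsf_sentence_spec : Claim_unchanged_generate_nsf_sentence := by
  intro sentence draw_set _ _ hD
  have hg : ∀ i < draw_set.length, ¬(bPos (draw_set.getD i ([], 0)) < 0 ∧
      0 < bPos (draw_set.getD i ([], 0)) +
        (((List.nil (α := String)).length + (PySem.Str.split₀ sentence).length : Nat) : Int) + i) := by
    intro i hi hc
    apply hD
    have hgd : draw_set.getD i ([], 0) = draw_set[i] := by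
      simp [List.getD, List.getElem?_eq_getElem hi]
    have h1 := hc.1
    have h2 := hc.2
    rw [bPos_eq, hgd] at h1 h2
    refine ⟨(draw_set[i], i), List.mk_mem_zipIdx_iff_getElem?.mpr (List.getElem?_eq_getElem hi), h1, ?_⟩
    simp only [List.length_nil] at h2
    push_cast at h2 ⊢
    omega
  have he := fold_eq draw_set [] (PySem.Str.split₀ sentence) hg
  unfold generate_nsf_sentence generate_nsf_sentence_alt
  rw [he]
  simp

theorem generate_nsf_sentence_changed : Claim_changed_generate_nsf_sentence := by
  unfold Claim_changed_generate_nsf_sentence; decide
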